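-- pv_equiv track=rewrite | github.com/manikmakki/TamAGI | backend/core/agent.py | _looks_complex
-- ===== SOURCE A (Python) =====
-- def _looks_complex(message: str) -> bool:
--     """Score-based heuristic for planning engine invocation.
--
--     Avoids false positives from long but simple messages (e.g. pasted text)
--     and false negatives from short but complex requests (e.g. "docker on arm?").
--     Returns True when the cumulative score exceeds the threshold.
--     """
--     lower = message.lower()
--     score = 0
--
--     # Length: moderate weight — long messages are often multi-step
--     word_count = len(message.split())
--     if word_count > 60:
--         score += 2
--     elif word_count > 30:
--         score += 1
--
--     # Action verbs that imply multi-step work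
--     action_verbs = (
--         "implement", "build", "create", "develop", "set up", "configure",
--         "deploy", "design", "refactor", "migrate", "orchestrate", "automate",
--         "install", "integrate", "optimize", "debug", "analyze", "generate",
--         "write a script", "write a program",
--     )
--     for phrase in action_verbs:
--         if phrase in lower:
--             score += 2
--             break  # count once
--
--     # Multi-step or planning language
--     planning_phrases = (
--         "step by step", "plan", "how do i", "help me", "can you",
--         "walk me through", "guide me", "explain how",
--     )
--     for phrase in planning_phrases:
--         if phrase in lower:
--             score += 1
--             break
--
--     # Technical domain keywords (each adds a point, up to 2)
--     tech_keywords = (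
--         "docker", "kubernetes", "npm", "pip", "git", "python", "bash",
--         "api", "database", "server", "arm", "gpu", "cuda", "ssl", "nginx",
--     )
--     tech_hits = sum(1 for kw in tech_keywords if kw in lower)
--     score += min(tech_hits, 2)
--
--     # Question words without "what is" / "who is" (factual, not planning)
--     if any(q in lower for q in ("how to", "how do", "how can", "how would")):
--         score += 1
--     elif lower.startswith(("what is ", "who is ", "when did ", "where is ")):
--         score -= 1  # Factual lookup — don't plan
--
--     return score >= 3
-- ===== SOURCE B (Python) =====
-- _TABLE = (
--     ("act", ("implement", "build", "create", "develop", "set up", "configure",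
--              "deploy", "design", "refactor", "migrate", "orchestrate", "automate",
--              "install", "integrate", "optimize", "debug", "analyze", "generate",
--              "write a script", "write a program")),
--     ("plan", ("step by step", "plan", "how do i", "help me", "can you",
--               "walk me through", "guide me", "explain how")),
--     ("tech", ("docker", "kubernetes", "npm", "pip", "git", "python", "bash",
--               "api", "database", "server", "arm", "gpu", "cuda", "ssl", "nginx")),
--     ("q", ("how to", "how do", "how can", "how would")),
-- )
--
--
-- def _matches_at(lower, i):
--     """All (category, phrase) pairs whose phrase starts at position i."""
--     return [(cat, p) for cat, phrases in _TABLE for p in phrases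
--             if lower.startswith(p, i)]
--
--
-- def _looks_complex(message: str) -> bool:
--     # One sweep over the text: at each position record which patterns start
--     # there; every phrase occurs in the text iff it starts at some position.
--     lower = message.lower()
--     hits = set()
--     for i in range(len(lower)):
--         hits.update(_matches_at(lower, i))
--
--     score = 0
--     wc = len(message.split())
--     if wc > 60:
--         score += 2
--     elif wc > 30:
--         score += 1
--     if any(c == "act" for c, _ in hits):
--         score += 2
--     if any(c == "plan" for c, _ in hits):
--         score += 1
--     score += min(sum(1 for c, _ in hits if c == "tech"), 2)
--     if any(c == "q" for c, _ in hits):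
--         score += 1
--     elif lower.startswith(("what is ", "who is ", "when did ", "where is ")):
--         score -= 1
--     return score >= 3
-- ===== Notes on version B (the rewrite author's own statement) =====
-- stated objective: alternative
-- what changed: A tests each phrase separately with substring searches over the message; B makes one left-to-right sweep over the lowered text, collecting at each position the set of (category, phrase) patterns that start there (a naive multi-pattern matcher), and then derives all category scores from that single hit set.
import Mathlib
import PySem

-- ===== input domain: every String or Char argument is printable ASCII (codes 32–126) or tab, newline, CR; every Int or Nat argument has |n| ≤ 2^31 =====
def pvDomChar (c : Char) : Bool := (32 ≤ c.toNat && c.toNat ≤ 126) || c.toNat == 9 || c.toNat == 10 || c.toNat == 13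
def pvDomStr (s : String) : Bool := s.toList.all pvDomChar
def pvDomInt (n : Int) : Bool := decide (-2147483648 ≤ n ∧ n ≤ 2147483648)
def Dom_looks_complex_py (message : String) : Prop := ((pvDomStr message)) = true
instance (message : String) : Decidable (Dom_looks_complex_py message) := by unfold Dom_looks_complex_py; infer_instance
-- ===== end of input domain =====

-- B replaces A's per-phrase substring searches by one positional sweep over the lowered
-- text that collects the set of matched (category, phrase) patterns; objective: alternative.

-- shared phrase-list constants (data only)
def pvActionVerbs : List String :=
  ["implement", "build", "create", "develop", "set up", "configure",
   "deploy", "design", "refactor", "migrate", "orchestrate", "automate",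
   "install", "integrate", "optimize", "debug", "analyze", "generate",
   "write a script", "write a program"]

def pvPlanningPhrases : List String :=
  ["step by step", "plan", "how do i", "help me", "can you",
   "walk me through", "guide me", "explain how"]

def pvTechKeywords : List String :=
  ["docker", "kubernetes", "npm", "pip", "git", "python", "bash",
   "api", "database", "server", "arm", "gpu", "cuda", "ssl", "nginx"]

def pvQPhrases : List String := ["how to", "how do", "how can", "how would"]

-- ===== PORT A =====
-- A's 'for phrase in …: if phrase in lower: score += inc; break' loop, literally
def pvBreakLoop (phrases : List String) (lower : String) (inc : Int) : Int :=
  match phrases with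
  | [] => 0
  | p :: rest => if PySem.Str.isIn p lower then inc else pvBreakLoop rest lower inc

def looks_complex_py (message : String) : Bool :=
  let lower := PySem.Str.lower message
  let score : Int := 0
  let word_count := (PySem.Str.split₀ message).length
  let score := if word_count > 60 then score + 2
               else if word_count > 30 then score + 1 else score
  let score := score + pvBreakLoop pvActionVerbs lower 2
  let score := score + pvBreakLoop pvPlanningPhrases lower 1
  -- tech_hits = sum(1 for kw in tech_keywords if kw in lower)
  let tech_hits := pvTechKeywords.foldl
      (fun acc kw => if PySem.Str.isIn kw lower then acc + 1 else acc) (0 : Int)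
  let score := score + min tech_hits 2
  let score := if (pvQPhrases.any (fun q => PySem.Str.isIn q lower)) then score + 1
               else if (["what is ", "who is ", "when did ", "where is "].any
                    (fun p => PySem.Str.startswith lower p)) then score - 1
               else score
  decide (score ≥ 3)

-- ===== PORT B =====
-- B's pattern table: (category, phrases)
def pvTable : List (String × List String) :=
  [("act", pvActionVerbs), ("plan", pvPlanningPhrases),
   ("tech", pvTechKeywords), ("q", pvQPhrases)]

-- _matches_at: all (category, phrase) pairs whose phrase starts at position i
-- (lower.startswith(p, i) is exactly 'p.toList <+: (toList lower).drop i')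
def pvMatchesAt (ls : List Char) (i : Nat) : List (String × String) :=
  pvTable.flatMap (fun ce =>
    (ce.2.filter (fun p => p.toList.isPrefixOf (ls.drop i))).map (fun p => (ce.1, p)))

def looks_complex_py_alt (message : String) : Bool :=
  let lower := PySem.Str.lower message
  let ls := lower.toList
  -- for i in range(len(lower)): hits.update(_matches_at(lower, i))
  let hits : PySem.Set (String × String) :=
    (List.range ls.length).foldl (fun hs i => PySem.Set.update hs (pvMatchesAt ls i))
      PySem.Set.empty
  let score : Int := 0
  let wc := (PySem.Str.split₀ message).length
  let score := if wc > 60 then score + 2 else if wc > 30 then score + 1 else score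
  let score := if hits.any (fun x => x.1 == "act") then score + 2 else score
  let score := if hits.any (fun x => x.1 == "plan") then score + 1 else score
  let score := score + min ((hits.countP (fun x => x.1 == "tech") : Nat) : Int) 2
  let score := if hits.any (fun x => x.1 == "q") then score + 1
               else if (["what is ", "who is ", "when did ", "where is "].any
                    (fun p => PySem.Str.startswith lower p)) then score - 1
               else score
  decide (score ≥ 3)

-- ===== PRECONDITION & SPEC =====
def Spec_looks_complex_py (message : String) (out : Bool) : Prop := out = looks_complex_py_alt message
instance (message : String) (out : Bool) : Decidable (Spec_looks_complex_py message out) := by unfold Spec_looks_complex_py; infer_instance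

-- ===== CLAIM (what is proved, stated in full; the proofs are below) =====
def Claim_equal_looks_complex_py : Prop := ∀ (message : String), Dom_looks_complex_py message → Spec_looks_complex_py message (looks_complex_py message)

-- ===== LEMMAS AND PROOFS =====

-- membership in the sweep's accumulated hit set
theorem pv_mem_foldl_update {α : Type} [BEq α] [LawfulBEq α] (f : Nat → List α)
    (l : List Nat) (s : PySem.Set α) (y : α) :
    y ∈ l.foldl (fun hs i => PySem.Set.update hs (f i)) s ↔ y ∈ s ∨ ∃ i ∈ l, y ∈ f i := by
  induction l generalizing s with
  | nil => simp
  | cons a l ih =>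
    simp only [List.foldl_cons, ih, PySem.Set.mem_update, List.mem_cons]
    constructor
    · rintro ((h | h) | ⟨i, hi, hy⟩)
      · exact Or.inl h
      · exact Or.inr ⟨a, Or.inl rfl, h⟩
      · exact Or.inr ⟨i, Or.inr hi, hy⟩
    · rintro (h | ⟨i, (rfl | hi), hy⟩)
      · exact Or.inl (Or.inl h)
      · exact Or.inl (Or.inr hy)
      · exact Or.inr ⟨i, hi, hy⟩

theorem pv_nodup_foldl_update {α : Type} [BEq α] [LawfulBEq α] (f : Nat → List α)
    (l : List Nat) (s : PySem.Set α) (hs : s.Nodup) :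
    (l.foldl (fun hs i => PySem.Set.update hs (f i)) s).Nodup := by
  induction l generalizing s with
  | nil => exact hs
  | cons a l ih => exact ih _ (PySem.Set.nodup_update _ _ hs)

-- the sweep finds a (nonempty) phrase iff the phrase occurs in the text
theorem pv_exists_range_prefix_iff_isIn (p : String) (lower : String) (hp : p.toList ≠ []) :
    (∃ i ∈ List.range lower.toList.length, p.toList.isPrefixOf (lower.toList.drop i)) ↔
      PySem.Str.isIn p lower = true := by
  rw [PySem.Str.isIn_iff_infix, ← PySem.Chars.isIn_iff_infix,
      ← PySem.Chars.exists_prefix_drop_iff_isIn]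
  · constructor
    · rintro ⟨i, _, h⟩; exact ⟨i, List.isPrefixOf_iff_prefix.mp h⟩
    · rintro ⟨j, h⟩
      refine ⟨j, List.mem_range.mpr ?_, List.isPrefixOf_iff_prefix.mpr h⟩
      by_contra hj
      rw [List.drop_eq_nil_of_le (Nat.le_of_not_lt hj)] at h
      exact hp (List.prefix_nil.mp h)

-- category membership in the hit set, per table entry
theorem pv_mem_hits_iff (lower : String) (cat : String) (p : String) :
    ((cat, p) ∈ (List.range lower.toList.length).foldl
        (fun hs i => PySem.Set.update hs (pvMatchesAt lower.toList i)) PySem.Set.empty) ↔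
      ∃ ce ∈ pvTable, cat = ce.1 ∧ p ∈ ce.2 ∧
        ∃ i ∈ List.range lower.toList.length, p.toList.isPrefixOf (lower.toList.drop i) := by
  rw [pv_mem_foldl_update]
  simp only [PySem.Set.empty, List.not_mem_nil, false_or, pvMatchesAt, List.mem_flatMap,
    List.mem_map, List.mem_filter, Prod.mk.injEq]
  constructor
  · rintro ⟨i, hi, ce, hce, q, ⟨hq, hpre⟩, hcat, rfl⟩
    exact ⟨ce, hce, hcat.symm, hq, i, hi, hpre⟩
  · rintro ⟨ce, hce, hcat, hq, i, hi, hpre⟩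
    exact ⟨i, hi, ce, hce, p, ⟨hq, hpre⟩, hcat.symm, rfl⟩

-- every phrase of the table is nonempty
theorem pv_table_nonempty : ∀ ce ∈ pvTable, ∀ p ∈ ce.2, p.toList ≠ [] := by decide

-- 'any hit of category c' collapses to A's 'any phrase occurs'
theorem pv_hits_any_eq (lower : String) (cat : String) (ps : List String)
    (hmem : ∀ q, (∃ ce ∈ pvTable, cat = ce.1 ∧ q ∈ ce.2) ↔ q ∈ ps) :
    (((List.range lower.toList.length).foldl
        (fun hs i => PySem.Set.update hs (pvMatchesAt lower.toList i))
        PySem.Set.empty).any (fun x => x.1 == cat))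
      = ps.any (fun q => PySem.Str.isIn q lower) := by
  rw [Bool.eq_iff_iff, List.any_eq_true, List.any_eq_true]
  constructor
  · rintro ⟨⟨c, q⟩, hin, hc⟩
    simp only [beq_iff_eq] at hc
    subst hc
    rw [pv_mem_hits_iff] at hin
    obtain ⟨ce, hce, hcat, hq, hocc⟩ := hin
    refine ⟨q, (hmem q).mp ⟨ce, hce, hcat, hq⟩, ?_⟩
    exact (pv_exists_range_prefix_iff_isIn q lower (pv_table_nonempty ce hce q hq)).mp hocc
  · rintro ⟨q, hq, hocc⟩
    obtain ⟨ce, hce, hcat, hqe⟩ := (hmem q).mpr hq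
    refine ⟨(cat, q), ?_, by simp⟩
    rw [pv_mem_hits_iff]
    exact ⟨ce, hce, hcat, hqe, (pv_exists_range_prefix_iff_isIn q lower
      (pv_table_nonempty ce hce q hqe)).mpr hocc⟩

-- the tech part of the hit set counts exactly the occurring tech keywords
theorem pv_hits_tech_count (lower : String) :
    (((List.range lower.toList.length).foldl
        (fun hs i => PySem.Set.update hs (pvMatchesAt lower.toList i))
        PySem.Set.empty).countP (fun x => x.1 == "tech"))
      = pvTechKeywords.countP (fun kw => PySem.Str.isIn kw lower) := by
  set hits := (List.range lower.toList.length).foldl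
      (fun hs i => PySem.Set.update hs (pvMatchesAt lower.toList i)) PySem.Set.empty with hh
  have hmem : ∀ x, x ∈ hits.filter (fun x => x.1 == "tech") ↔
      x ∈ (pvTechKeywords.filter (fun kw => PySem.Str.isIn kw lower)).map
        (fun kw => (("tech" : String), kw)) := by
    rintro ⟨c, q⟩
    simp only [List.mem_filter, List.mem_map, beq_iff_eq]
    constructor
    · rintro ⟨hin, rfl⟩
      rw [hh, pv_mem_hits_iff] at hin
      obtain ⟨ce, hce, hcat, hq, hocc⟩ := hin
      have hcet : ce.2 = pvTechKeywords := by
        have : ce.1 = "tech" := hcat.symm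
        fin_cases hce <;> simp_all
      refine ⟨q, ⟨hcet ▸ hq, ?_⟩, rfl⟩
      exact (pv_exists_range_prefix_iff_isIn q lower (pv_table_nonempty ce hce q hq)).mp hocc
    · rintro ⟨kw, hkw, heq⟩
      obtain ⟨hk, hocc⟩ := hkw
      obtain ⟨rfl, rfl⟩ := Prod.mk.injEq .. ▸ heq
      refine ⟨?_, rfl⟩
      rw [hh, pv_mem_hits_iff]
      refine ⟨("tech", pvTechKeywords), by simp [pvTable], rfl, hk, ?_⟩
      exact (pv_exists_range_prefix_iff_isIn kw lower
        (pv_table_nonempty ("tech", pvTechKeywords) (by decide) kw hk)).mpr hocc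
  have hnd1 : (hits.filter (fun x => x.1 == "tech")).Nodup :=
    (pv_nodup_foldl_update _ _ _ List.nodup_nil).filter _
  have hnd2 : ((pvTechKeywords.filter (fun kw => PySem.Str.isIn kw lower)).map
      (fun kw => (("tech" : String), kw))).Nodup := by
    refine List.Nodup.map (fun a b h => by simpa using h) ?_
    exact (by decide : pvTechKeywords.Nodup).filter _
  have hperm := (List.perm_ext_iff_of_nodup hnd1 hnd2).mpr hmem
  calc hits.countP (fun x => x.1 == "tech")
      = (hits.filter (fun x => x.1 == "tech")).length := by rw [List.countP_eq_length_filter]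
    _ = ((pvTechKeywords.filter (fun kw => PySem.Str.isIn kw lower)).map
          (fun kw => (("tech" : String), kw))).length := hperm.length_eq
    _ = pvTechKeywords.countP (fun kw => PySem.Str.isIn kw lower) := by
          rw [List.length_map, List.countP_eq_length_filter]

-- the table's categories name exactly the three any-style phrase lists
theorem pv_act_iff : ∀ q : String, (∃ ce ∈ pvTable, "act" = ce.1 ∧ q ∈ ce.2) ↔ q ∈ pvActionVerbs := by
  intro q
  constructor
  · rintro ⟨ce, hce, hcat, hq⟩
    fin_cases hce
    · exact hq
    · exact absurd hcat (by decide)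
    · exact absurd hcat (by decide)
    · exact absurd hcat (by decide)
  · intro hq
    exact ⟨("act", pvActionVerbs), by decide, rfl, hq⟩

theorem pv_plan_iff : ∀ q : String, (∃ ce ∈ pvTable, "plan" = ce.1 ∧ q ∈ ce.2) ↔ q ∈ pvPlanningPhrases := by
  intro q
  constructor
  · rintro ⟨ce, hce, hcat, hq⟩
    fin_cases hce
    · exact absurd hcat (by decide)
    · exact hq
    · exact absurd hcat (by decide)
    · exact absurd hcat (by decide)
  · intro hq
    exact ⟨("plan", pvPlanningPhrases), by decide, rfl, hq⟩

theorem pv_q_iff : ∀ q : String, (∃ ce ∈ pvTable, "q" = ce.1 ∧ q ∈ ce.2) ↔ q ∈ pvQPhrases := by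
  intro q
  constructor
  · rintro ⟨ce, hce, hcat, hq⟩
    fin_cases hce
    · exact absurd hcat (by decide)
    · exact absurd hcat (by decide)
    · exact absurd hcat (by decide)
    · exact hq
  · intro hq
    exact ⟨("q", pvQPhrases), by decide, rfl, hq⟩

-- A's break-loop equals "if any phrase hits then inc else 0"
theorem pvBreakLoop_eq (phrases : List String) (lower : String) (inc : Int) :
    pvBreakLoop phrases lower inc
      = if phrases.any (fun p => PySem.Str.isIn p lower) then inc else 0 := by
  induction phrases with
  | nil => simp [pvBreakLoop]
  | cons p rest ih =>
    simp only [pvBreakLoop, List.any_cons, Bool.or_eq_true, ih]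
    split_ifs <;> tauto

-- A's conditional-increment foldl counts the hits
theorem pvFoldlCount_eq (kws : List String) (lower : String) (acc : Int) :
    kws.foldl (fun acc kw => if PySem.Str.isIn kw lower then acc + 1 else acc) acc
      = acc + ((kws.countP (fun kw => PySem.Str.isIn kw lower) : Nat) : Int) := by
  induction kws generalizing acc with
  | nil => simp
  | cons k rest ih =>
    simp only [List.foldl_cons, List.countP_cons, ih]
    split_ifs <;> push_cast <;> ring

-- ===== VERDICT (by name: the statement is the Claim_ definition above) =====
set_option maxHeartbeats 2000000 in
theorem looks_complex_py_spec : Claim_equal_looks_complex_py := by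
  intro message _
  unfold Spec_looks_complex_py looks_complex_py looks_complex_py_alt
  simp only [pv_hits_any_eq _ "act" pvActionVerbs pv_act_iff,
      pv_hits_any_eq _ "plan" pvPlanningPhrases pv_plan_iff,
      pv_hits_any_eq _ "q" pvQPhrases pv_q_iff,
      pv_hits_tech_count, pvBreakLoop_eq, pvFoldlCount_eq, zero_add]
  rw [decide_eq_decide]
  split_ifs <;> omega
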